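-- pv_equiv track=rewrite | github.com/jabaricodes/beginner_python | lucky_sum_jgarrawa.py | lucky_sum
-- ===== SOURCE A (Python) =====
-- def lucky_sum(num1,num2): #defines function for user to input 2 lucky numbers
--     if num1 > num2:
--         num1, num2 = num2, num1 #allows numbers to be interchangeable
--     total = 0
--     for i in range(num1,num2+1):
--         if i%3!=0: #sets requirement for lucy sum
--             total += i
--     return total
-- ===== SOURCE B (Python) =====
-- def lucky_sum(num1, num2):
--     lo, hi = (num2, num1) if num1 > num2 else (num1, num2)
--     total = (lo + hi) * (hi - lo + 1) // 2
--     k1 = -((-lo) // 3)   # smallest multiple-index: ceil(lo/3)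
--     k2 = hi // 3         # largest multiple-index: floor(hi/3)
--     if k1 <= k2:
--         total -= (3 * (k1 + k2)) * (k2 - k1 + 1) // 2
--     return total
-- ===== Notes on version B (the rewrite author's own statement) =====
-- stated objective: faster
-- what changed: Replaced the O(n) loop over range(num1,num2+1) by a closed-form Gauss sum of the whole interval minus the closed-form sum of the multiples of 3 in it.
import Mathlib
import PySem

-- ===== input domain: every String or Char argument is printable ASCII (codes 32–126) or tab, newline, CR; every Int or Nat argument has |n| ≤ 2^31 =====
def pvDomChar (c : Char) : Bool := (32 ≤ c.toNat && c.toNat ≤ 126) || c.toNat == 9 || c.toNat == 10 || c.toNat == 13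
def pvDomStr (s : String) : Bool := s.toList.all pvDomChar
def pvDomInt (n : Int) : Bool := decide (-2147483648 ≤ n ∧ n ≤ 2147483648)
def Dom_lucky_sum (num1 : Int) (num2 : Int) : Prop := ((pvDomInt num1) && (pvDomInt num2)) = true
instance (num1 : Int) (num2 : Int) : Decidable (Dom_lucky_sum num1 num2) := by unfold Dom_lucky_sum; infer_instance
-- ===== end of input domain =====

-- B replaces A's O(n) loop by a closed-form Gauss sum minus the closed-form sum of the multiples of 3 (objective: faster).

-- ===== PORT A =====
-- literal transliteration of A: swap to order the bounds, then fold the loop body over range(num1, num2+1)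
def lucky_sum (num1 : Int) (num2 : Int) : Int :=
  let a := if num1 > num2 then num2 else num1
  let b := if num1 > num2 then num1 else num2
  (PySem.List.pyRange a (b + 1) 1).foldl
    (fun total i => if PySem.Int.mod i 3 ≠ 0 then total + i else total) 0

-- ===== PORT B =====
-- literal transliteration of Source B: Gauss sum of [lo,hi] minus closed-form sum of multiples of 3
def lucky_sum_alt (num1 : Int) (num2 : Int) : Int :=
  let lo := if num1 > num2 then num2 else num1
  let hi := if num1 > num2 then num1 else num2
  let total := PySem.Int.floordiv ((lo + hi) * (hi - lo + 1)) 2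
  let k1 := -(PySem.Int.floordiv (-lo) 3)
  let k2 := PySem.Int.floordiv hi 3
  if k1 ≤ k2 then total - PySem.Int.floordiv ((3 * (k1 + k2)) * (k2 - k1 + 1)) 2 else total

-- ===== PRECONDITION & SPEC =====
def Spec_lucky_sum (num1 : Int) (num2 : Int) (out : Int) : Prop := out = lucky_sum_alt num1 num2
instance (num1 : Int) (num2 : Int) (out : Int) : Decidable (Spec_lucky_sum num1 num2 out) := by unfold Spec_lucky_sum; infer_instance

-- ===== CLAIM (what is proved, stated in full; the proofs are below) =====
def Claim_equal_lucky_sum : Prop := ∀ (num1 : Int) (num2 : Int), Dom_lucky_sum num1 num2 → Spec_lucky_sum num1 num2 (lucky_sum num1 num2)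

-- ===== LEMMAS AND PROOFS =====

-- the loop body of A, named for the proofs only
def pvF (total i : Int) : Int := if PySem.Int.mod i 3 ≠ 0 then total + i else total

-- closed form of the plain Gauss sum of n terms starting at a (euclidean division; divisor 2 > 0)
def pvTc (a : Int) (n : Nat) : Int := ((2 * a + (n : Int) - 1) * (n : Int)) / 2

-- closed form of 3*k1 + 3*(k1+1) + … + 3*k2 (0 when the range is empty)
def pvKsum (k1 k2 : Int) : Int := if k1 ≤ k2 then ((3 * (k1 + k2)) * (k2 - k1 + 1)) / 2 else 0

lemma pvF_acc (l : List Int) : ∀ acc : Int, l.foldl pvF acc = acc + l.foldl pvF 0 := by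
  induction l with
  | nil => intro acc; simp
  | cons x l ih =>
    intro acc
    have hx : pvF acc x = acc + pvF 0 x := by unfold pvF; split_ifs <;> ring
    simp only [List.foldl_cons]
    rw [ih (pvF acc x), ih (pvF 0 x), hx]
    ring

lemma pvTc_succ (a : Int) (n : Nat) : pvTc a (n + 1) = a + pvTc (a + 1) n := by
  obtain ⟨c, hc⟩ := Int.even_mul_succ_self (n : Int)
  have e1 : (2 * a + ((n : Int) + 1) - 1) * ((n : Int) + 1) = 2 * (a * ((n : Int) + 1) + c) := by
    linear_combination hc
  have e2 : (2 * (a + 1) + (n : Int) - 1) * (n : Int) = 2 * (a * (n : Int) + c) := by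
    linear_combination hc
  unfold pvTc
  push_cast
  rw [e1, e2, Int.mul_ediv_cancel_left _ two_ne_zero, Int.mul_ediv_cancel_left _ two_ne_zero]
  ring

lemma pvKsum_nil (k1 k2 : Int) (h : k2 < k1) : pvKsum k1 k2 = 0 := by
  unfold pvKsum; rw [if_neg (by omega)]

lemma pvKsum_peel (k1 k2 : Int) (h : k1 ≤ k2) : pvKsum k1 k2 = 3 * k1 + pvKsum (k1 + 1) k2 := by
  obtain ⟨c, hc⟩ := Int.even_mul_succ_self (k2 - k1)
  have e1 : (3 * (k1 + k2)) * (k2 - k1 + 1) = 2 * (3 * k1 * (k2 - k1 + 1) + 3 * c) := by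
    linear_combination 3 * hc
  unfold pvKsum
  rw [if_pos h, e1, Int.mul_ediv_cancel_left _ two_ne_zero]
  by_cases h2 : k1 + 1 ≤ k2
  · have e2 : (3 * ((k1 + 1) + k2)) * (k2 - (k1 + 1) + 1) = 2 * (3 * k1 * (k2 - k1) + 3 * c) := by
      linear_combination 3 * hc
    rw [if_pos h2, e2, Int.mul_ediv_cancel_left _ two_ne_zero]; ring
  · rw [if_neg h2]
    have hk : k1 = k2 := by omega
    subst hk
    have hc0 : c = 0 := by simp at hc; omega
    subst hc0
    ring

-- the loop of A over [a, a+n) equals "Gauss sum minus sum of multiples of 3", in closed form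
lemma pvMain (n : Nat) : ∀ a : Int,
    (PySem.List.pyRange a (a + (n : Int)) 1).foldl pvF 0
      = pvTc a n - pvKsum (-((-a) / 3)) ((a + (n : Int) - 1) / 3) := by
  induction n with
  | zero =>
    intro a
    rw [show a + ((0 : Nat) : Int) = a by simp, PySem.List.pyRange_one_eq_nil (le_refl a)]
    have h2 : (a - 1) / 3 < -((-a) / 3) := by omega
    rw [pvKsum_nil _ _ h2]
    simp [pvTc]
  | succ n ih =>
    intro a
    have hlt : a < a + ((n + 1 : Nat) : Int) := by push_cast; omega
    rw [PySem.List.pyRange_one_cons hlt]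
    simp only [List.foldl_cons]
    rw [pvF_acc]
    rw [show a + ((n + 1 : Nat) : Int) = (a + 1) + ((n : Nat) : Int) by push_cast; ring]
    rw [ih (a + 1)]
    have hmod : PySem.Int.mod a 3 = a % 3 := PySem.Int.mod_eq_emod_of_pos (by norm_num)
    rw [show pvTc a (n + 1) = a + pvTc (a + 1) n from pvTc_succ a n]
    have hk2 : ((a + 1) + ((n : Nat) : Int) - 1) / 3 = ((a + 1) + ((n : Nat) : Int) - 1) / 3 := rfl
    by_cases hm : a % 3 = 0
    · have hF : pvF 0 a = 0 := by unfold pvF; rw [hmod]; simp [hm]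
      have hk1 : -((-a) / 3) = a / 3 := by omega
      have hk1' : -((-(a + 1)) / 3) = a / 3 + 1 := by omega
      have hle : a / 3 ≤ ((a + 1) + ((n : Nat) : Int) - 1) / 3 := by omega
      rw [hF, hk1, hk1', pvKsum_peel _ _ hle]
      have h3a : 3 * (a / 3) = a := by omega
      generalize pvTc (a + 1) n = t
      generalize pvKsum (a / 3 + 1) (((a + 1) + ((n : Nat) : Int) - 1) / 3) = s
      omega
    · have hF : pvF 0 a = a := by unfold pvF; rw [hmod]; simp [hm]
      have hk1' : -((-(a + 1)) / 3) = -((-a) / 3) := by omega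
      rw [hF, hk1']
      generalize pvTc (a + 1) n = t
      generalize pvKsum (-((-a) / 3)) (((a + 1) + ((n : Nat) : Int) - 1) / 3) = s
      omega

lemma pvEq (num1 num2 : Int) : lucky_sum num1 num2 = lucky_sum_alt num1 num2 := by
  unfold lucky_sum lucky_sum_alt
  simp only []
  set a := if num1 > num2 then num2 else num1 with ha
  set b := if num1 > num2 then num1 else num2 with hb
  have hab : a ≤ b := by rw [ha, hb]; split_ifs with h <;> omega
  set n : Nat := (b + 1 - a).toNat with hn
  have hcast : ((n : Nat) : Int) = b + 1 - a := by omega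
  have hrange : b + 1 = a + ((n : Nat) : Int) := by omega
  rw [hrange, show (fun total i => if PySem.Int.mod i 3 ≠ 0 then total + i else total) = pvF from rfl,
      pvMain n a]
  have hd2 : ∀ x : Int, PySem.Int.floordiv x 2 = x / 2 :=
    fun x => PySem.Int.floordiv_eq_ediv_of_pos (by norm_num)
  have hd3 : ∀ x : Int, PySem.Int.floordiv x 3 = x / 3 :=
    fun x => PySem.Int.floordiv_eq_ediv_of_pos (by norm_num)
  rw [hd2, hd3, hd3]
  have hT : pvTc a n = ((a + b) * (b - a + 1)) / 2 := by
    unfold pvTc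
    rw [hcast]
    ring_nf
  have hhi : a + ((n : Nat) : Int) - 1 = b := by omega
  rw [hT, hhi]
  unfold pvKsum
  split_ifs with h
  · rw [hd2]
  · ring

-- ===== VERDICT (by name: the statement is the Claim_ definition above) =====
theorem lucky_sum_spec : Claim_equal_lucky_sum := by
  intro num1 num2 _
  unfold Spec_lucky_sum
  exact pvEq num1 num2
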